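-- pv_equiv track=rewrite | github.com/Deflaus/CoursesPython | 1.Основы питона/7.Работа с разными форматами данных (json, xml)/xmll.py | SearchFor6digitsWords
-- ===== SOURCE A (Python) =====
-- def SearchFor6digitsWords(list):
--     news_str = ''
--     for news in list:
--         news_str += news  # получили строку состоящую из новостей
--
--     news_strs = news_str.split()
--     # получили отстортированный список из слов от большего количества символов к меньшему
--     news_strs.sort(key=len, reverse=True)
--     output_list = []
--     for word in news_strs:
--         if len(word) >= 6:
--             output_list.append(word)
--     return output_list
-- ===== SOURCE B (Python) =====
-- def SearchFor6digitsWords(list):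
--     news_str = ''
--     for news in list:
--         news_str += news
--     buckets = {}
--     for word in news_str.split():
--         n = len(word)
--         if n >= 6:
--             buckets.setdefault(n, []).append(word)
--     output_list = []
--     for n in sorted(buckets, reverse=True):
--         output_list.extend(buckets[n])
--     return output_list
-- ===== Notes on version B (the rewrite author's own statement) =====
-- stated objective: alternative
-- what changed: Replaces the comparison sort of all words (sort by len, reverse, then filter) with length-bucketing into a dict of the >=6-length words and emitting buckets in descending key order, preserving scan order within equal lengths.
import Mathlib
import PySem

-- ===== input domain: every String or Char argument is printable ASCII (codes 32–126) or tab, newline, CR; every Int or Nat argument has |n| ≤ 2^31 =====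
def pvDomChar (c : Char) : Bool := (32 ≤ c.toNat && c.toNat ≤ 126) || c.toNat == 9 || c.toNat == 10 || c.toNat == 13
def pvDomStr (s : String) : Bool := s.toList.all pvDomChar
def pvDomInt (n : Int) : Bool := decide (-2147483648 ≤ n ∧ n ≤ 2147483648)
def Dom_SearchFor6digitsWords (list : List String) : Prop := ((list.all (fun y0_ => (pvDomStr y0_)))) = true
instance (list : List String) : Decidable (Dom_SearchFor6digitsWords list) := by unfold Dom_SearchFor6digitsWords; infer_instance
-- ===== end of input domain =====

-- B replaces A's comparison sort of all words (sort by len desc, then filter ≥ 6) by bucketing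
-- the ≥6-length words into a dict keyed by length and emitting buckets in descending key order.

-- ===== PORT A =====
def SearchFor6digitsWords (list : List String) : List String :=
  let news_str := list.foldl (fun acc news => acc ++ news) ""
  let news_strs := PySem.List.sorted (PySem.Str.split₀ news_str) (fun w => PySem.Str.len w) true
  news_strs.foldl (fun out word => if 6 ≤ PySem.Str.len word then out ++ [word] else out) []

-- ===== PORT B =====
def SearchFor6digitsWords_alt (list : List String) : List String :=
  let news_str := list.foldl (fun acc news => acc ++ news) ""
  let buckets := (PySem.Str.split₀ news_str).foldl
    (fun d word =>
      if 6 ≤ PySem.Str.len word then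
        PySem.Dict.modify d (PySem.Str.len word) [] (fun b => b ++ [word])
      else d)
    PySem.Dict.empty
  (PySem.List.sorted buckets.keys (fun n => n) true).foldl
    (fun out n => out ++ buckets.getD n []) []

-- ===== PRECONDITION & SPEC =====
def Spec_SearchFor6digitsWords (list : List String) (out : List String) : Prop := out = SearchFor6digitsWords_alt list
instance (list : List String) (out : List String) : Decidable (Spec_SearchFor6digitsWords list out) := by unfold Spec_SearchFor6digitsWords; infer_instance

-- ===== CLAIM (what is proved, stated in full; the proofs are below) =====
def Claim_equal_SearchFor6digitsWords : Prop := ∀ (list : List String), Dom_SearchFor6digitsWords list → Spec_SearchFor6digitsWords list (SearchFor6digitsWords list)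

-- ===== LEMMAS AND PROOFS =====

-- insertBy puts x in front when x goes before every element
theorem pv_insertBy_all {α : Type} (bf : α → α → Bool) (x : α) (ys : List α)
    (h : ∀ y ∈ ys, bf x y = true) :
    PySem.List.insertBy bf x ys = x :: ys := by
  cases ys with
  | nil => rfl
  | cons y ys => simp [PySem.List.insertBy, h y (by simp)]

-- inserting keeps the descending-key invariant
theorem pv_pairwise_insertBy {α κ : Type} [LinearOrder κ] (key : α → κ) (x : α) (ys : List α)
    (h : ys.Pairwise (fun a b => key b ≤ key a)) :
    (PySem.List.insertBy (fun a b => decide (key b < key a)) x ys).Pairwise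
      (fun a b => key b ≤ key a) := by
  induction ys with
  | nil => simp [PySem.List.insertBy]
  | cons y ys ih =>
    rcases List.pairwise_cons.mp h with ⟨hy, ht⟩
    by_cases hb : key y < key x
    · simp only [PySem.List.insertBy, hb, decide_true, if_pos]
      refine List.pairwise_cons.mpr ⟨?_, h⟩
      intro z hz
      rcases List.mem_cons.mp hz with rfl | hz
      · exact le_of_lt hb
      · exact le_trans (hy z hz) (le_of_lt hb)
    · simp only [PySem.List.insertBy, hb, decide_false, Bool.false_eq_true, if_false]
      refine List.pairwise_cons.mpr ⟨?_, ih ht⟩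
      intro z hz
      rcases (PySem.List.mem_insertBy _ x z ys).mp hz with hz | hz
      · subst hz; exact le_of_not_gt hb
      · exact hy z hz

-- filtering commutes with one insertion into a descending list
theorem pv_filter_insertBy {α κ : Type} [LinearOrder κ] (key : α → κ) (q : α → Bool)
    (x : α) (ys : List α) (h : ys.Pairwise (fun a b => key b ≤ key a)) :
    (PySem.List.insertBy (fun a b => decide (key b < key a)) x ys).filter q =
      if q x then PySem.List.insertBy (fun a b => decide (key b < key a)) x (ys.filter q)
      else ys.filter q := by
  induction ys with
  | nil => by_cases hq : q x <;> simp [PySem.List.insertBy, hq]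
  | cons y ys ih =>
    rcases List.pairwise_cons.mp h with ⟨hy, ht⟩
    by_cases hb : key y < key x
    · simp only [PySem.List.insertBy, hb, decide_true, if_pos]
      have hall : ∀ z ∈ (y :: ys).filter q, (fun a b => decide (key b < key a)) x z = true := by
        intro z hz
        have hz' := List.mem_of_mem_filter hz
        rcases List.mem_cons.mp hz' with rfl | hz'
        · simpa using hb
        · exact decide_eq_true (lt_of_le_of_lt (hy z hz') hb)
      rw [pv_insertBy_all _ x _ hall]
      by_cases hq : q x <;> simp [hq]
    · simp only [PySem.List.insertBy, hb, decide_false, Bool.false_eq_true, if_false]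
      by_cases hqy : q y
      · simp only [List.filter_cons, hqy, if_pos, ih ht]
        by_cases hq : q x
        · simp only [hq, if_pos]
          simp [PySem.List.insertBy, hb]
        · simp [hq]
      · simp [hqy, ih ht]

-- filtering commutes with the whole insertion-sort fold
theorem pv_foldl_ins_filter {α κ : Type} [LinearOrder κ] (key : α → κ) (q : α → Bool)
    (ws : List α) :
    ∀ (acc : List α), acc.Pairwise (fun a b => key b ≤ key a) →
    (ws.foldl (fun acc x => PySem.List.insertBy (fun a b => decide (key b < key a)) x acc) acc).filter q =
      (ws.filter q).foldl (fun acc x => PySem.List.insertBy (fun a b => decide (key b < key a)) x acc) (acc.filter q) := by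
  induction ws with
  | nil => intro acc _; rfl
  | cons x ws ih =>
    intro acc hacc
    have h1 := ih (PySem.List.insertBy (fun a b => decide (key b < key a)) x acc)
      (pv_pairwise_insertBy key x acc hacc)
    rw [List.foldl_cons, h1, pv_filter_insertBy key q x acc hacc]
    by_cases hq : q x
    · simp [hq]
    · simp [hq]

-- stable descending sort commutes with filter
theorem pv_sorted_filter {α κ : Type} [LinearOrder κ] (key : α → κ) (q : α → Bool) (ws : List α) :
    (PySem.List.sorted ws key true).filter q = PySem.List.sorted (ws.filter q) key true := by
  rw [PySem.List.sorted_rev_eq_foldl_insertBy, PySem.List.sorted_rev_eq_foldl_insertBy]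
  simpa using pv_foldl_ins_filter key q ws [] (by simp)

-- flatMap respects pointwise equality on members
theorem pv_flatMap_congr {α β : Type} (S : List α) (f g : α → List β)
    (h : ∀ m ∈ S, f m = g m) : S.flatMap f = S.flatMap g := by
  induction S with
  | nil => rfl
  | cons x S ih =>
    rw [List.flatMap_cons, List.flatMap_cons, h x (by simp),
      ih (fun m hm => h m (by simp [hm]))]

-- a descending list bounded by n is its n-block followed by the rest
theorem pv_partition {α κ : Type} [LinearOrder κ] [BEq κ] [LawfulBEq κ] (key : α → κ) (n : κ)
    (l : List α) (h : l.Pairwise (fun a b => key b ≤ key a)) (hb : ∀ y ∈ l, key y ≤ n) :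
    l = l.filter (fun y => key y == n) ++ l.filter (fun y => !(key y == n)) := by
  induction l with
  | nil => rfl
  | cons x l ih =>
    rcases List.pairwise_cons.mp h with ⟨hx, ht⟩
    by_cases hk : key x = n
    · have := ih ht (fun y hy => hb y (by simp [hy]))
      simp only [List.filter_cons, hk, beq_self_eq_true, if_pos, Bool.not_true,
        Bool.false_eq_true, if_false]
      rw [List.cons_append]
      exact congrArg (x :: ·) this
    · have hlt : key x < n := lt_of_le_of_ne (hb x (by simp)) hk
      have hall : ∀ y ∈ x :: l, key y < n := by
        intro y hy
        rcases List.mem_cons.mp hy with rfl | hy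
        · exact hlt
        · exact lt_of_le_of_lt (hx y hy) hlt
      have h1 : (x :: l).filter (fun y => key y == n) = [] := by
        rw [List.filter_eq_nil_iff]
        intro y hy
        simp [ne_of_lt (hall y hy)]
      have h2 : (x :: l).filter (fun y => !(key y == n)) = x :: l := by
        rw [List.filter_eq_self]
        intro y hy
        simp [ne_of_lt (hall y hy)]
      rw [h1, h2, List.nil_append]

-- the bucket decomposition of a stable descending sort
theorem pv_decomp {α κ : Type} [LinearOrder κ] [BEq κ] [LawfulBEq κ] (key : α → κ) :
    ∀ (S : List κ) (ws : List α), S.Pairwise (fun a b => b < a) →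
      (∀ w ∈ ws, key w ∈ S) →
      PySem.List.sorted ws key true = S.flatMap (fun n => ws.filter (fun w => key w == n)) := by
  intro S
  induction S with
  | nil =>
    intro ws _ hk
    have hnil : ws = [] := List.eq_nil_iff_forall_not_mem.mpr (fun w hw => by simpa using hk w hw)
    subst hnil
    simp [PySem.List.sorted_eq_nil_iff]
  | cons n S ih =>
    intro ws hp hk
    rcases List.pairwise_cons.mp hp with ⟨hn, ht⟩
    have hbound : ∀ y ∈ PySem.List.sorted ws key true, key y ≤ n := by
      intro y hy
      rcases List.mem_cons.mp (hk y ((PySem.List.mem_sorted ws key true y).mp hy)) with h | h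
      · exact le_of_eq h
      · exact le_of_lt (hn _ h)
    have hpart := pv_partition key n (PySem.List.sorted ws key true)
      (PySem.List.sorted_pairwise_rev ws key) hbound
    have heq1 : (PySem.List.sorted ws key true).filter (fun y => key y == n) =
        ws.filter (fun w => key w == n) := by
      rw [pv_sorted_filter]
      apply PySem.List.sorted_rev_eq_self_of_pairwise
      apply List.pairwise_of_forall_mem_list
      intro a ha b hb
      have ha' := List.of_mem_filter ha
      have hb' := List.of_mem_filter hb
      simp only [beq_iff_eq] at ha' hb'
      rw [ha', hb']
    have hbuckets : ∀ m ∈ S,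
        (ws.filter (fun w => !(key w == n))).filter (fun w => key w == m) =
        ws.filter (fun w => key w == m) := by
      intro m hm
      have hmn : m ≠ n := ne_of_lt (hn m hm)
      rw [List.filter_filter]
      apply List.filter_congr
      intro a _
      by_cases h : key a = m
      · simp [h, hmn]
      · simp [h]
    have heq2 : (PySem.List.sorted ws key true).filter (fun y => !(key y == n)) =
        S.flatMap (fun m => ws.filter (fun w => key w == m)) := by
      rw [pv_sorted_filter]
      rw [ih (ws.filter (fun w => !(key w == n))) ht ?_]
      · exact pv_flatMap_congr S _ _ hbuckets
      · intro w hw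
        have h1 := List.mem_of_mem_filter hw
        have h2 := List.of_mem_filter hw
        simp only [Bool.not_eq_eq_eq_not, Bool.not_true, beq_eq_false_iff_ne, ne_eq] at h2
        rcases List.mem_cons.mp (hk w h1) with h | h
        · exact absurd h h2
        · exact h
    rw [List.flatMap_cons, ← heq1, ← heq2]
    exact hpart

-- ===== VERDICT (by name: the statement is the Claim_ definition above) =====
theorem SearchFor6digitsWords_spec : Claim_equal_SearchFor6digitsWords := by
  intro list _
  unfold Spec_SearchFor6digitsWords
  simp only [SearchFor6digitsWords, SearchFor6digitsWords_alt]
  generalize PySem.Str.split₀ (list.foldl (fun acc news => acc ++ news) "") = ws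
  -- A side: fold-with-append is a filter of the sorted list, which is the sorted filtered list
  rw [PySem.List.foldl_append_ite_eq_filter (fun w => 6 ≤ PySem.Str.len w)]
  rw [List.nil_append, pv_sorted_filter]
  -- B side: reduce the guarded bucket fold to a fold over the filtered words
  rw [PySem.List.foldl_ite_eq_foldl_filter (fun w => 6 ≤ PySem.Str.len w)
    (fun d word => PySem.Dict.modify d (PySem.Str.len word) [] (fun b => b ++ [word]))]
  generalize hws' : ws.filter (fun x => decide (6 ≤ PySem.Str.len x)) = ws'
  -- the bucket dict
  have hkeys : (ws'.foldl (fun d word =>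
      PySem.Dict.modify d (PySem.Str.len word) [] (fun b => b ++ [word]))
      PySem.Dict.empty).keys = PySem.Set.ofList (ws'.map (fun w => PySem.Str.len w)) := by
    rw [PySem.Dict.keys_foldl_modify_key ws' (fun w => PySem.Str.len w) []
      (fun _ x => fun b => b ++ [x]) PySem.Dict.empty]
    rfl
  have hgetD : ∀ (m : Int), (ws'.foldl (fun d word =>
      PySem.Dict.modify d (PySem.Str.len word) [] (fun b => b ++ [word]))
      PySem.Dict.empty).getD m [] = ws'.filter (fun w => PySem.Str.len w == m) := by
    intro m
    have hmap : ws'.foldl (fun d word =>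
        PySem.Dict.modify d (PySem.Str.len word) [] (fun b => b ++ [word]))
        PySem.Dict.empty =
        (ws'.map (fun w => (PySem.Str.len w, w))).foldl
          (fun d p => PySem.Dict.modify d p.1 [] (fun b => b ++ [p.2])) PySem.Dict.empty := by
      rw [List.foldl_map]
    rw [hmap, PySem.Dict.getD_foldl_modify_append]
    rw [List.filter_map]
    simp [List.map_map, Function.comp_def]
  rw [hkeys]
  rw [PySem.List.foldl_append_eq_flatMap
    (fun n => (ws'.foldl (fun d word =>
      PySem.Dict.modify d (PySem.Str.len word) [] (fun b => b ++ [word]))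
      PySem.Dict.empty).getD n [])]
  rw [List.nil_append]
  rw [pv_flatMap_congr _ _ _ (fun m _ => hgetD m)]
  -- both sides are now the bucket decomposition
  set lens := PySem.List.sorted (PySem.Set.ofList (ws'.map (fun w => PySem.Str.len w)))
    (fun n => n) true with hlens
  have hnd : lens.Nodup := ((PySem.List.sorted_perm _ _ _).nodup_iff).mpr
    (PySem.Set.nodup_ofList _)
  have hge : lens.Pairwise (fun a b => b ≤ a) :=
    PySem.List.sorted_pairwise_rev _ (fun n => n)
  have hgt : lens.Pairwise (fun a b => b < a) :=
    (hge.and hnd).imp (fun h => lt_of_le_of_ne h.1 (Ne.symm h.2))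
  have hmem : ∀ w ∈ ws', PySem.Str.len w ∈ lens := by
    intro w hw
    rw [hlens, PySem.List.mem_sorted, PySem.Set.mem_ofList]
    exact List.mem_map_of_mem hw
  exact pv_decomp (fun w => PySem.Str.len w) lens ws' hgt hmem
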